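-- pv_equiv track=rewrite | github.com/lingfromSh/django-loguru | dj_loguru/utils.py | filter_by_logger_name
-- ===== SOURCE A (Python) =====
-- def filter_by_logger_name(record, logger_name, propagate=False):
--     splited_extra_logger_name = record["extra"]["logger_name"].split(".")
--     splited_logger_name = logger_name.split(".")
--
--     if propagate and len(splited_logger_name) <= len(splited_extra_logger_name):
--         return all(
--             (
--                 item == splited_extra_logger_name[idx]
--                 for idx, item in enumerate(splited_logger_name)
--             )
--         )
--     else:
--         return splited_logger_name == splited_extra_logger_name
-- ===== SOURCE B (Python) =====
-- def filter_by_logger_name(record, logger_name, propagate=False):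
--     extra = record["extra"]["logger_name"]
--     return extra == logger_name or (propagate and extra.startswith(logger_name + "."))
-- ===== Notes on version B (the rewrite author's own statement) =====
-- stated objective: idiomatic
-- what changed: A splits both dotted names into component lists and loops with all()/enumerate over components; B compares the raw strings directly in one expression, encoding the component-prefix match as extra == logger_name or (propagate and extra.startswith(logger_name + '.')) with no splitting, list building or loop.
import Mathlib
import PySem

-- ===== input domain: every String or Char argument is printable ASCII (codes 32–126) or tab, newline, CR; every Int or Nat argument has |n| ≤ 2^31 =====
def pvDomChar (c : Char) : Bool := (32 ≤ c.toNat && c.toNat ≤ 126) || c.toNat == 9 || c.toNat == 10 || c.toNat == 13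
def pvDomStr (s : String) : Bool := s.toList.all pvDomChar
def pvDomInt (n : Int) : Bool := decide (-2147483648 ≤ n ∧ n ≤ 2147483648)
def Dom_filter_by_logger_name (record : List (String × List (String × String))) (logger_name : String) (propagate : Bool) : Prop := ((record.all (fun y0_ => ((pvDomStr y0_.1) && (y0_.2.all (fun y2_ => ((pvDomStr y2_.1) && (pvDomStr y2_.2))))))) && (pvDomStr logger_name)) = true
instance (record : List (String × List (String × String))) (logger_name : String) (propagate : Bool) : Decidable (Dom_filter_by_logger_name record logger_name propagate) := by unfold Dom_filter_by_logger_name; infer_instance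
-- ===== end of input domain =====

-- B replaces A's split-into-components + all()/enumerate loop by one direct expression on
-- the raw strings (equality, or startswith with a "." appended); same return value everywhere.

-- ===== PORT A =====
-- record["extra"]["logger_name"]: two dict lookups; KeyError (→ none, excluded by Pre_) if missing.
def filter_by_logger_name (record : List (String × List (String × String))) (logger_name : String) (propagate : Bool) : Bool :=
  match PySem.Dict.get? (PySem.Dict.mk record) "extra" with
  | none => false  -- Python raises KeyError here; outside Pre_
  | some extra_d =>
    match PySem.Dict.get? (PySem.Dict.mk extra_d) "logger_name" with
    | none => false  -- Python raises KeyError here; outside Pre_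
    | some eln =>
      -- .split(".") with a nonempty separator, on code points
      let splited_extra_logger_name := PySem.Chars.splitOn eln.toList ['.']
      let splited_logger_name := PySem.Chars.splitOn logger_name.toList ['.']
      if propagate && decide (splited_logger_name.length ≤ splited_extra_logger_name.length) then
        (PySem.List.enumerate splited_logger_name).all
          (fun p => p.2 == PySem.List.pyGetD splited_extra_logger_name p.1 [])
      else
        splited_logger_name == splited_extra_logger_name

-- ===== PORT B =====
def filter_by_logger_name_alt (record : List (String × List (String × String))) (logger_name : String) (propagate : Bool) : Bool :=
  ((PySem.Dict.get? (PySem.Dict.mk record) "extra").bind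
      (fun d => PySem.Dict.get? (PySem.Dict.mk d) "logger_name")).elim
    false  -- Python raises KeyError on a missing key; outside Pre_
    (fun extra =>
      extra == logger_name || (propagate && PySem.Str.startswith extra (logger_name ++ ".")))

-- ===== PRECONDITION & SPEC =====
-- Pre_ excludes exactly the inputs where Python A (and B alike) raises KeyError:
-- record must have an "extra" key whose value has a "logger_name" key.
def Pre_filter_by_logger_name (record : List (String × List (String × String))) (logger_name : String) (propagate : Bool) : Prop :=
  (((PySem.Dict.get? (PySem.Dict.mk record) "extra").bind
      (fun d => PySem.Dict.get? (PySem.Dict.mk d) "logger_name")).isSome) = true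
instance (record : List (String × List (String × String))) (logger_name : String) (propagate : Bool) : Decidable (Pre_filter_by_logger_name record logger_name propagate) := by unfold Pre_filter_by_logger_name; infer_instance

def pvWitness_filter_by_logger_name : (List (String × List (String × String))) × String × Bool :=
  ([("extra", [("logger_name", "a.b")])], "a", true)

def Spec_filter_by_logger_name (record : List (String × List (String × String))) (logger_name : String) (propagate : Bool) (out : Bool) : Prop := out = filter_by_logger_name_alt record logger_name propagate
instance (record : List (String × List (String × String))) (logger_name : String) (propagate : Bool) (out : Bool) : Decidable (Spec_filter_by_logger_name record logger_name propagate out) := by unfold Spec_filter_by_logger_name; infer_instance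

-- ===== CLAIM (what is proved, stated in full; the proofs are below) =====
def Claim_equal_filter_by_logger_name : Prop := ∀ (record : List (String × List (String × String))) (logger_name : String) (propagate : Bool), Dom_filter_by_logger_name record logger_name propagate → Pre_filter_by_logger_name record logger_name propagate → Spec_filter_by_logger_name record logger_name propagate (filter_by_logger_name record logger_name propagate)

-- ===== LEMMAS AND PROOFS =====
def splitD : List Char → List (List Char)
  | [] => [[]]
  | c :: rest => if c = '.' then [] :: splitD rest else (splitD rest).modifyHead (c :: ·)

theorem splitD_ne_nil (cs : List Char) : splitD cs ≠ [] := by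
  cases cs with
  | nil => simp [splitD]
  | cons c rest =>
    simp only [splitD]
    split
    · simp
    · cases h : splitD rest with
      | nil => exact absurd h (splitD_ne_nil rest)
      | cons a as => simp [List.modifyHead]

theorem go_spec (fuel : Nat) : ∀ (l cur : List Char) (accs : List (List Char)),
    l.length ≤ fuel →
    PySem.Chars.splitOn.go ['.'] fuel l cur accs =
      accs.reverse ++ (cur.reverse ++ (splitD l).headI) :: (splitD l).tail := by
  induction fuel with
  | zero =>
    intro l cur accs h
    have : l = [] := List.eq_nil_of_length_eq_zero (Nat.le_zero.mp h)
    subst this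
    simp [PySem.Chars.splitOn.go, splitD]
  | succ n ih =>
    intro l cur accs h
    cases l with
    | nil => simp [PySem.Chars.splitOn.go, splitD]
    | cons c rest =>
      simp only [PySem.Chars.splitOn.go]
      by_cases hc : c = '.'
      · subst hc
        have hp : List.isPrefixOf ['.'] ('.' :: rest) = true := by simp [List.isPrefixOf]
        rw [if_pos hp]
        show PySem.Chars.splitOn.go ['.'] n (List.drop ['.'].length ('.' :: rest)) [] (cur.reverse :: accs) = _
        simp only [List.length_cons, List.length_nil, List.drop_succ_cons, List.drop_zero]
        rw [ih rest [] _ (by simpa using Nat.le_of_succ_le_succ h)]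
        obtain ⟨a, as, hsp⟩ : ∃ a as, splitD rest = a :: as := by
          cases hx : splitD rest with
          | nil => exact absurd hx (splitD_ne_nil rest)
          | cons a as => exact ⟨a, as, rfl⟩
        simp [splitD, hsp]
      · have hp : List.isPrefixOf ['.'] (c :: rest) = false := by
          simp [List.isPrefixOf]; exact fun hcc => absurd hcc.symm hc
        rw [if_neg (by simp [hp])]
        rw [ih rest (c :: cur) accs (by simpa using Nat.le_of_succ_le_succ h)]
        obtain ⟨a, as, hsp⟩ : ∃ a as, splitD rest = a :: as := by
          cases hx : splitD rest with
          | nil => exact absurd hx (splitD_ne_nil rest)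
          | cons a as => exact ⟨a, as, rfl⟩
        simp [splitD, hsp, hc, List.modifyHead]

theorem splitOn_eq (cs : List Char) : PySem.Chars.splitOn cs ['.'] = splitD cs := by
  rw [PySem.Chars.splitOn, go_spec (cs.length + 1) cs [] [] (by omega)]
  cases hx : splitD cs with
  | nil => exact absurd hx (splitD_ne_nil cs)
  | cons a as => simp

theorem splitD_dot (rest : List Char) : splitD ('.' :: rest) = [] :: splitD rest := by
  simp [splitD]

theorem splitD_cons {c : Char} (rest : List Char) (hc : ¬ c = '.') :
    splitD (c :: rest) = (splitD rest).modifyHead (c :: ·) := by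
  simp [splitD, hc]

theorem splitD_head_cons {c : Char} (rest : List Char) (hc : ¬ c = '.') :
    ∃ a as, splitD rest = a :: as ∧ splitD (c :: rest) = (c :: a) :: as := by
  cases hx : splitD rest with
  | nil => exact absurd hx (splitD_ne_nil rest)
  | cons a as => exact ⟨a, as, rfl, by rw [splitD_cons rest hc, hx]; rfl⟩

theorem prefix_iff (ts : List Char) : ∀ (cs : List Char),
    splitD ts <+: splitD cs ↔ (ts = cs ∨ (ts ++ ['.']) <+: cs) := by
  induction ts with
  | nil =>
    intro cs
    cases cs with
    | nil => simp [splitD]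
    | cons c rest =>
      by_cases hc : c = '.'
      · subst hc
        rw [splitD_dot]
        simp only [splitD, List.nil_append]
        constructor
        · intro _; right; exact ⟨rest, rfl⟩
        · intro _; exact ⟨splitD rest, rfl⟩
      · obtain ⟨a, as, _, hsp⟩ := splitD_head_cons rest hc
        rw [hsp]
        have hc' : ¬('.' = c) := fun h => hc h.symm
        simp [splitD, List.cons_prefix_cons, hc']
  | cons t ts' ih =>
    intro cs
    cases cs with
    | nil =>
      constructor
      · intro hpre
        exfalso
        by_cases ht : t = '.'
        · subst ht
          rw [splitD_dot] at hpre
          have hlen := hpre.length_le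
          simp only [splitD, List.length_cons, List.length_singleton] at hlen
          have := splitD_ne_nil ts'
          cases hx : splitD ts' with
          | nil => exact this hx
          | cons a as => rw [hx] at hlen; simp at hlen
        · obtain ⟨a, as, _, hsp⟩ := splitD_head_cons ts' ht
          rw [hsp] at hpre
          have h2 : (t :: a) :: as <+: [([] : List Char)] := by simpa [splitD] using hpre
          have h3 := (List.cons_prefix_cons.mp h2).1
          simp at h3
      · rintro (h | h)
        · simp at h
        · simp at h
    | cons c cs' =>
      by_cases ht : t = '.' <;> by_cases hc : c = '.'
      · subst ht; subst hc
        rw [splitD_dot, splitD_dot, List.cons_prefix_cons]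
        simp only [List.cons_append, List.cons_prefix_cons, List.cons.injEq]
        rw [ih cs']
        simp
      · subst ht
        obtain ⟨b, bs, _, hsp⟩ := splitD_head_cons cs' hc
        rw [splitD_dot, hsp, List.cons_prefix_cons]
        have hc' : ¬('.' = c) := fun h => hc h.symm
        simp [List.cons_prefix_cons, hc']
      · subst hc
        obtain ⟨a, as, _, hsp⟩ := splitD_head_cons ts' ht
        rw [hsp, splitD_dot, List.cons_prefix_cons]
        simp [List.cons_prefix_cons, ht]
      · obtain ⟨a, as, hsa, hsa'⟩ := splitD_head_cons ts' ht
        obtain ⟨b, bs, hsb, hsb'⟩ := splitD_head_cons cs' hc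
        rw [hsa', hsb', List.cons_prefix_cons]
        have hiff := ih cs'
        rw [hsa, hsb, List.cons_prefix_cons] at hiff
        simp only [List.cons.injEq, List.cons_append, List.cons_prefix_cons]
        constructor
        · rintro ⟨⟨hte, hab⟩, hpre⟩
          rcases hiff.mp ⟨hab, hpre⟩ with h | h
          · exact Or.inl ⟨hte, h⟩
          · exact Or.inr ⟨hte, h⟩
        · rintro (⟨hte, h⟩ | ⟨hte, h⟩)
          · rcases hiff.mpr (Or.inl h) with ⟨hab, hpre⟩
            exact ⟨⟨hte, hab⟩, hpre⟩
          · rcases hiff.mpr (Or.inr h) with ⟨hab, hpre⟩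
            exact ⟨⟨hte, hab⟩, hpre⟩

theorem splitD_length_mono : ∀ (ts cs : List Char), (ts ++ ['.']) <+: cs →
    (splitD ts).length < (splitD cs).length := by
  intro ts
  induction ts with
  | nil =>
    intro cs h
    simp only [List.nil_append] at h
    obtain ⟨rest, rfl⟩ : ∃ rest, cs = '.' :: rest := by
      cases cs with
      | nil => simp at h
      | cons c cs' =>
        have := (List.cons_prefix_cons.mp h).1
        exact ⟨cs', by rw [this]⟩
    rw [splitD_dot]
    have := splitD_ne_nil rest
    cases hx : splitD rest with
    | nil => exact absurd hx this
    | cons a as => simp [splitD, hx]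
  | cons t ts' ih =>
    intro cs h
    cases cs with
    | nil => simp at h
    | cons c cs' =>
      rw [List.cons_append, List.cons_prefix_cons] at h
      obtain ⟨rfl, h⟩ := h
      by_cases ht : t = '.'
      · subst ht
        rw [splitD_dot, splitD_dot]
        simpa using ih cs' h
      · obtain ⟨a, as, hsa, hsa'⟩ := splitD_head_cons ts' ht
        obtain ⟨b, bs, hsb, hsb'⟩ := splitD_head_cons cs' ht
        rw [hsa', hsb']
        have := ih cs' h
        rw [hsa, hsb] at this
        simpa using this

theorem splitD_length_mono' {ts cs : List Char} (h : (ts ++ ['.']) <+: cs) :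
    (splitD ts).length < (splitD cs).length := splitD_length_mono ts cs h

theorem splitD_inj (ts cs : List Char) : splitD ts = splitD cs ↔ ts = cs := by
  constructor
  · intro h
    have h1 := (prefix_iff ts cs).mp (h ▸ List.prefix_refl _)
    have h2 := (prefix_iff cs ts).mp (h ▸ List.prefix_refl _)
    rcases h1 with h1 | h1
    · exact h1
    rcases h2 with h2 | h2
    · exact h2.symm
    have l1 := splitD_length_mono' h1
    have l2 := splitD_length_mono' h2
    omega
  · intro h; rw [h]

theorem enum_all (as bs : List (List Char)) (h : as.length ≤ bs.length) :
    ((PySem.List.enumerate as).all (fun p => p.2 == PySem.List.pyGetD bs p.1 [])) =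
      as.isPrefixOf bs := by
  have hget : ∀ (i : Nat) (hi : i < bs.length),
      PySem.List.pyGetD bs ((0 : Int) + (i : Int)) [] = bs[i] := by
    intro i hi
    have : ((0 : Int) + (i : Int)) = ((i : Nat) : Int) := by push_cast; ring
    rw [this, PySem.List.pyGetD_natCast, List.getD_eq_getElem _ _ hi]
  rw [Bool.eq_iff_iff, List.all_eq_true, List.isPrefixOf_iff_prefix, List.prefix_iff_eq_take]
  constructor
  · intro hall
    apply List.ext_getElem (by simp [Nat.min_eq_left h])
    intro i h1 h2
    have hmem := hall _ ((PySem.List.mem_enumerate_iff as 0 _).mpr ⟨i, h1, rfl⟩)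
    simp only [beq_iff_eq] at hmem
    have hib : i < bs.length := lt_of_lt_of_le h1 h
    rw [hmem, hget i hib]
    simp
  · intro htake p hp
    obtain ⟨k, hk, rfl⟩ := (PySem.List.mem_enumerate_iff as 0 p).mp hp
    simp only [beq_iff_eq]
    have hkb : k < bs.length := lt_of_lt_of_le hk h
    rw [hget k hkb]
    rw [List.getElem_of_eq htake hk]
    simp

theorem body_eq (eln ln : String) (prop : Bool) :
    (if prop && decide ((PySem.Chars.splitOn ln.toList ['.']).length ≤ (PySem.Chars.splitOn eln.toList ['.']).length) then
       (PySem.List.enumerate (PySem.Chars.splitOn ln.toList ['.'])).all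
         (fun p => p.2 == PySem.List.pyGetD (PySem.Chars.splitOn eln.toList ['.']) p.1 [])
     else PySem.Chars.splitOn ln.toList ['.'] == PySem.Chars.splitOn eln.toList ['.'])
    = (eln == ln || (prop && PySem.Str.startswith eln (ln ++ "."))) := by
  rw [splitOn_eq, splitOn_eq]
  have htl : (ln ++ ".").toList = ln.toList ++ ['.'] := by simp
  have hsw : PySem.Str.startswith eln (ln ++ ".") = true ↔ (ln.toList ++ ['.']) <+: eln.toList := by
    rw [PySem.Str.startswith, ← htl]
    exact PySem.Chars.startswith_iff _ _
  cases prop with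
  | false =>
    simp only [Bool.false_and, Bool.false_eq_true, if_false, Bool.or_false]
    rw [Bool.eq_iff_iff]
    simp only [beq_iff_eq, splitD_inj, ← String.toList_inj]
    exact ⟨Eq.symm, Eq.symm⟩
  | true =>
    simp only [Bool.true_and]
    by_cases hlen : (splitD ln.toList).length ≤ (splitD eln.toList).length
    · rw [if_pos (by simp [hlen])]
      rw [enum_all _ _ hlen, Bool.eq_iff_iff, List.isPrefixOf_iff_prefix, prefix_iff]
      rw [Bool.or_eq_true, beq_iff_eq, hsw, ← String.toList_inj]
      constructor
      · rintro (h | h)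
        · exact Or.inl h.symm
        · exact Or.inr h
      · rintro (h | h)
        · exact Or.inl h.symm
        · exact Or.inr h
    · rw [if_neg (by simp [hlen]), Bool.eq_iff_iff]
      rw [beq_iff_eq, splitD_inj, Bool.or_eq_true, beq_iff_eq, hsw, ← String.toList_inj]
      constructor
      · intro h; exact absurd (h ▸ le_refl _) hlen
      · rintro (h | h)
        · exact absurd (h ▸ le_refl _) hlen
        · exact absurd (le_of_lt (splitD_length_mono' h)) hlen

-- ===== VERDICT (by name: the statement is the Claim_ definition above) =====
theorem filter_by_logger_name_spec : Claim_equal_filter_by_logger_name := by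
  intro record logger_name propagate _ _
  unfold Spec_filter_by_logger_name filter_by_logger_name filter_by_logger_name_alt
  cases hx : PySem.Dict.get? (PySem.Dict.mk record) "extra" with
  | none => simp [hx]
  | some d =>
    cases hy : PySem.Dict.get? (PySem.Dict.mk d) "logger_name" with
    | none => simp [hx, hy]
    | some eln =>
      simp only [hx, hy, Option.bind_some, Option.elim_some]
      exact body_eq eln logger_name propagate
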